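-- pv_equiv track=rewrite | github.com/Spooderbob/pp67 | advisor/marketplace.py | _quick_sell_for
-- ===== SOURCE A (Python) =====
-- def _quick_sell_for(ovr: int) -> int:
--     """Approximate quick-sell floors used by The Show.
--
--     These have been stable across recent titles. They define the price floor —
--     no card sells below quick-sell because the game will buy it from you for
--     that amount.
--     """
--     table = [
--         (99, 75000), (95, 25000), (90, 10000), (85, 5000),
--         (80, 1000),  (75, 400),   (70, 100),   (65, 25),
--     ]
--     for threshold, value in table:
--         if ovr >= threshold:
--             return value
--     return 5
-- ===== SOURCE B (Python) =====
-- import bisect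
--
-- _THRESHOLDS = [65, 70, 75, 80, 85, 90, 95, 99]
-- _VALUES = [25, 100, 400, 1000, 5000, 10000, 25000, 75000]
--
-- def _quick_sell_for(ovr: int) -> int:
--     """Quick-sell price floor via binary search over an ascending table."""
--     idx = bisect.bisect_right(_THRESHOLDS, ovr)
--     if idx == 0:
--         return 5
--     return _VALUES[idx - 1]
-- ===== Notes on version B (the rewrite author's own statement) =====
-- stated objective: idiomatic
-- what changed: Replaces the descending linear scan over (threshold,value) pairs with a bisect_right binary search over an ascending threshold list paired with a parallel value list.
import Mathlib
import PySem

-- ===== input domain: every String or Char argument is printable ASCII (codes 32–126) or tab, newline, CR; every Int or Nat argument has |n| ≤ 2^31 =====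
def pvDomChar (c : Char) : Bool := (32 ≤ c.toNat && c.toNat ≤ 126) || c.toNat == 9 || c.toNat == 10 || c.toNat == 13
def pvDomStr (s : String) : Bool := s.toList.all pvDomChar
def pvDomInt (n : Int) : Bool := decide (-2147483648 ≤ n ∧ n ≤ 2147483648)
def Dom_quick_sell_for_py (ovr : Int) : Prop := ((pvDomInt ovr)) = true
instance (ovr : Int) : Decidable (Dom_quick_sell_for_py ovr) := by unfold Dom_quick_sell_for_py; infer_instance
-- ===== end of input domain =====

-- B replaces A's descending linear scan with an ascending-table lookup keyed by
-- bisect_right (ported as the insertion-point count on the sorted threshold list); idiomatic, same behaviour.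


-- ===== PORT A =====
-- the for-loop with early return over the table
def quickSellScan (ovr : Int) : List (Int × Int) → Int
  | [] => 5
  | (threshold, value) :: rest =>
      if ovr ≥ threshold then value else quickSellScan ovr rest

def quick_sell_for_py (ovr : Int) : Int :=
  quickSellScan ovr
    [(99, 75000), (95, 25000), (90, 10000), (85, 5000),
     (80, 1000),  (75, 400),   (70, 100),   (65, 25)]

-- ===== PORT B =====
def bThresholds : List Int := [65, 70, 75, 80, 85, 90, 95, 99]
def bValues : List Int := [25, 100, 400, 1000, 5000, 10000, 25000, 75000]

-- bisect.bisect_right on a sorted list = number of elements ≤ ovr (the insertion point)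
def bisectRight (xs : List Int) (ovr : Int) : Int :=
  (xs.countP (fun t => t ≤ ovr) : Nat)

def quick_sell_for_py_alt (ovr : Int) : Int :=
  let idx := bisectRight bThresholds ovr
  if idx == 0 then 5
  else (PySem.List.pyGet? bValues (idx - 1)).getD 0  -- idx-1 is always in range here

-- ===== PRECONDITION & SPEC =====
def Spec_quick_sell_for_py (ovr : Int) (out : Int) : Prop := out = quick_sell_for_py_alt ovr
instance (ovr : Int) (out : Int) : Decidable (Spec_quick_sell_for_py ovr out) := by unfold Spec_quick_sell_for_py; infer_instance

-- ===== CLAIM (what is proved, stated in full; the proofs are below) =====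
def Claim_equal_quick_sell_for_py : Prop := ∀ (ovr : Int), Dom_quick_sell_for_py ovr → Spec_quick_sell_for_py ovr (quick_sell_for_py ovr)

-- ===== LEMMAS AND PROOFS =====

-- ===== VERDICT (by name: the statement is the Claim_ definition above) =====
theorem quick_sell_for_py_spec : Claim_equal_quick_sell_for_py := by
  intro ovr _
  unfold Spec_quick_sell_for_py quick_sell_for_py quick_sell_for_py_alt quickSellScan bisectRight bThresholds bValues
  rcases Int.lt_or_le ovr 65 with h0 | h0
  · norm_num [quickSellScan, List.countP, List.countP.go, PySem.List.pyGet?, PySem.List.pyIdx?, Int.toNat, show ¬((65:Int) ≤ ovr) from by omega, show ¬((70:Int) ≤ ovr) from by omega, show ¬((75:Int) ≤ ovr) from by omega, show ¬((80:Int) ≤ ovr) from by omega, show ¬((85:Int) ≤ ovr) from by omega, show ¬((90:Int) ≤ ovr) from by omega, show ¬((95:Int) ≤ ovr) from by omega, show ¬((99:Int) ≤ ovr) from by omega]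
  rcases Int.lt_or_le ovr 70 with h1 | h1
  · norm_num [quickSellScan, List.countP, List.countP.go, PySem.List.pyGet?, PySem.List.pyIdx?, Int.toNat, show ((65:Int) ≤ ovr) from by omega, show ¬((70:Int) ≤ ovr) from by omega, show ¬((75:Int) ≤ ovr) from by omega, show ¬((80:Int) ≤ ovr) from by omega, show ¬((85:Int) ≤ ovr) from by omega, show ¬((90:Int) ≤ ovr) from by omega, show ¬((95:Int) ≤ ovr) from by omega, show ¬((99:Int) ≤ ovr) from by omega]
  rcases Int.lt_or_le ovr 75 with h2 | h2
  · norm_num [quickSellScan, List.countP, List.countP.go, PySem.List.pyGet?, PySem.List.pyIdx?, Int.toNat, show ((65:Int) ≤ ovr) from by omega, show ((70:Int) ≤ ovr) from by omega, show ¬((75:Int) ≤ ovr) from by omega, show ¬((80:Int) ≤ ovr) from by omega, show ¬((85:Int) ≤ ovr) from by omega, show ¬((90:Int) ≤ ovr) from by omega, show ¬((95:Int) ≤ ovr) from by omega, show ¬((99:Int) ≤ ovr) from by omega]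
  rcases Int.lt_or_le ovr 80 with h3 | h3
  · norm_num [quickSellScan, List.countP, List.countP.go, PySem.List.pyGet?, PySem.List.pyIdx?, Int.toNat, show ((65:Int) ≤ ovr) from by omega, show ((70:Int) ≤ ovr) from by omega, show ((75:Int) ≤ ovr) from by omega, show ¬((80:Int) ≤ ovr) from by omega, show ¬((85:Int) ≤ ovr) from by omega, show ¬((90:Int) ≤ ovr) from by omega, show ¬((95:Int) ≤ ovr) from by omega, show ¬((99:Int) ≤ ovr) from by omega]
  rcases Int.lt_or_le ovr 85 with h4 | h4
  · norm_num [quickSellScan, List.countP, List.countP.go, PySem.List.pyGet?, PySem.List.pyIdx?, Int.toNat, show ((65:Int) ≤ ovr) from by omega, show ((70:Int) ≤ ovr) from by omega, show ((75:Int) ≤ ovr) from by omega, show ((80:Int) ≤ ovr) from by omega, show ¬((85:Int) ≤ ovr) from by omega, show ¬((90:Int) ≤ ovr) from by omega, show ¬((95:Int) ≤ ovr) from by omega, show ¬((99:Int) ≤ ovr) from by omega]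
  rcases Int.lt_or_le ovr 90 with h5 | h5
  · norm_num [quickSellScan, List.countP, List.countP.go, PySem.List.pyGet?, PySem.List.pyIdx?, Int.toNat, show ((65:Int) ≤ ovr) from by omega, show ((70:Int) ≤ ovr) from by omega, show ((75:Int) ≤ ovr) from by omega, show ((80:Int) ≤ ovr) from by omega, show ((85:Int) ≤ ovr) from by omega, show ¬((90:Int) ≤ ovr) from by omega, show ¬((95:Int) ≤ ovr) from by omega, show ¬((99:Int) ≤ ovr) from by omega]
  rcases Int.lt_or_le ovr 95 with h6 | h6
  · norm_num [quickSellScan, List.countP, List.countP.go, PySem.List.pyGet?, PySem.List.pyIdx?, Int.toNat, show ((65:Int) ≤ ovr) from by omega, show ((70:Int) ≤ ovr) from by omega, show ((75:Int) ≤ ovr) from by omega, show ((80:Int) ≤ ovr) from by omega, show ((85:Int) ≤ ovr) from by omega, show ((90:Int) ≤ ovr) from by omega, show ¬((95:Int) ≤ ovr) from by omega, show ¬((99:Int) ≤ ovr) from by omega]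
  rcases Int.lt_or_le ovr 99 with h7 | h7
  · norm_num [quickSellScan, List.countP, List.countP.go, PySem.List.pyGet?, PySem.List.pyIdx?, Int.toNat, show ((65:Int) ≤ ovr) from by omega, show ((70:Int) ≤ ovr) from by omega, show ((75:Int) ≤ ovr) from by omega, show ((80:Int) ≤ ovr) from by omega, show ((85:Int) ≤ ovr) from by omega, show ((90:Int) ≤ ovr) from by omega, show ((95:Int) ≤ ovr) from by omega, show ¬((99:Int) ≤ ovr) from by omega]
  norm_num [quickSellScan, List.countP, List.countP.go, PySem.List.pyGet?, PySem.List.pyIdx?, Int.toNat, show ((65:Int) ≤ ovr) from by omega, show ((70:Int) ≤ ovr) from by omega, show ((75:Int) ≤ ovr) from by omega, show ((80:Int) ≤ ovr) from by omega, show ((85:Int) ≤ ovr) from by omega, show ((90:Int) ≤ ovr) from by omega, show ((95:Int) ≤ ovr) from by omega, show ((99:Int) ≤ ovr) from by omega]
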